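-- pv_equiv track=rewrite | github.com/TerenceG-cn/python_project | eular-proj/problem-300.py | solve
-- ===== SOURCE A (Python) =====
-- def solve(n):
--     for i in range(1,n+1):
--             if (n-i)^(2*n)^(3*n)==0:
--                 return 1
--     for j in range(1,2*n+1):
--             if n^(2*n-j)^(3*n)==0:
--                 return 1
--     for k in range(1,3*n+1):
--             if n^(2*n)^(3*n-k)==0:
--                 return 1
--     return 0
-- ===== SOURCE B (Python) =====
-- def solve(n):
--     if n < 1:
--         return 0
--     x = (2 * n) ^ (3 * n)
--     y = n ^ (3 * n)
--     z = n ^ (2 * n)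
--     return 1 if x < n or y < 2 * n or z < 3 * n else 0
-- ===== Notes on version B (the rewrite author's own statement) =====
-- stated objective: faster
-- what changed: Replaced the three linear scans over index ranges by solving each XOR equation in closed form (the unknown term must equal the XOR of the other two) and checking range membership with one comparison each, O(1) instead of O(n).
import Mathlib
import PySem

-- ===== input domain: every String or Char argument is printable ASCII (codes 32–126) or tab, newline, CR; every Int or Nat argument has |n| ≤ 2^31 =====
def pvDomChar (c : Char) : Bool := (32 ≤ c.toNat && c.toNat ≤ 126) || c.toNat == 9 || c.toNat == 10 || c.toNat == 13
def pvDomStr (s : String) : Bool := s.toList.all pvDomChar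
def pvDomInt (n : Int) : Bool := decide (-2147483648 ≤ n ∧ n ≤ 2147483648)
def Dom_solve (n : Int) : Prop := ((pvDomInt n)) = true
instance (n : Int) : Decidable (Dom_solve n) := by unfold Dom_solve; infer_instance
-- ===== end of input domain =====

-- B replaces A's three linear scans by solving each XOR equation in closed form (O(1) instead of O(n)).
-- ===== PORT A =====
def solveLoop1 (n : Int) : List Int → Bool
  | [] => false
  | i :: t =>
    if PySem.Int.bxor (PySem.Int.bxor (n - i) (2 * n)) (3 * n) = 0 then true
    else solveLoop1 n t

def solveLoop2 (n : Int) : List Int → Bool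
  | [] => false
  | j :: t =>
    if PySem.Int.bxor (PySem.Int.bxor n (2 * n - j)) (3 * n) = 0 then true
    else solveLoop2 n t

def solveLoop3 (n : Int) : List Int → Bool
  | [] => false
  | k :: t =>
    if PySem.Int.bxor (PySem.Int.bxor n (2 * n)) (3 * n - k) = 0 then true
    else solveLoop3 n t

def solve (n : Int) : Int :=
  if solveLoop1 n (PySem.List.pyRange 1 (n + 1) 1) then 1
  else if solveLoop2 n (PySem.List.pyRange 1 (2 * n + 1) 1) then 1
  else if solveLoop3 n (PySem.List.pyRange 1 (3 * n + 1) 1) then 1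
  else 0

-- ===== PORT B =====
def solve_alt (n : Int) : Int :=
  if n < 1 then 0
  else
    let x := PySem.Int.bxor (2 * n) (3 * n)
    let y := PySem.Int.bxor n (3 * n)
    let z := PySem.Int.bxor n (2 * n)
    if x < n || y < 2 * n || z < 3 * n then 1 else 0

-- ===== PRECONDITION & SPEC =====
def Spec_solve (n : Int) (out : Int) : Prop := out = solve_alt n
instance (n : Int) (out : Int) : Decidable (Spec_solve n out) := by unfold Spec_solve; infer_instance

-- ===== CLAIM (what is proved, stated in full; the proofs are below) =====
def Claim_equal_solve : Prop := ∀ (n : Int), Dom_solve n → Spec_solve n (solve n)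

-- ===== LEMMAS AND PROOFS =====
theorem natXorKey (a b c : Nat) : (a ^^^ b) ^^^ c = 0 ↔ b = a ^^^ c := by
  rw [Nat.xor_eq_zero_iff]
  constructor
  · intro h; have := congrArg (fun t => a ^^^ t) h
    simpa [← Nat.xor_assoc] using this
  · intro h; subst h; simp [← Nat.xor_assoc]

theorem bxor_toNat (p q : Int) (hp : 0 ≤ p) (hq : 0 ≤ q) :
    PySem.Int.bxor p q = ((p.toNat ^^^ q.toNat : Nat) : Int) :=
  PySem.Int.bxor_of_nonneg hp hq

theorem solveLoop1_true (n : Int) (l : List Int) :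
    solveLoop1 n l = true ↔
      ∃ i ∈ l, PySem.Int.bxor (PySem.Int.bxor (n - i) (2 * n)) (3 * n) = 0 := by
  induction l with
  | nil => simp [solveLoop1]
  | cons a t ih => by_cases h : PySem.Int.bxor (PySem.Int.bxor (n - a) (2 * n)) (3 * n) = 0 <;>
      simp [solveLoop1, h, ih]

theorem solveLoop2_true (n : Int) (l : List Int) :
    solveLoop2 n l = true ↔
      ∃ j ∈ l, PySem.Int.bxor (PySem.Int.bxor n (2 * n - j)) (3 * n) = 0 := by
  induction l with
  | nil => simp [solveLoop2]
  | cons a t ih => by_cases h : PySem.Int.bxor (PySem.Int.bxor n (2 * n - a)) (3 * n) = 0 <;>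
      simp [solveLoop2, h, ih]

theorem solveLoop3_true (n : Int) (l : List Int) :
    solveLoop3 n l = true ↔
      ∃ k ∈ l, PySem.Int.bxor (PySem.Int.bxor n (2 * n)) (3 * n - k) = 0 := by
  induction l with
  | nil => simp [solveLoop3]
  | cons a t ih => by_cases h : PySem.Int.bxor (PySem.Int.bxor n (2 * n)) (3 * n - a) = 0 <;>
      simp [solveLoop3, h, ih]

-- the generic step: searching u in [0, m) with (u ^ p) ^ q = 0 (all nonneg) succeeds iff p ^ q < m
theorem searchKey (p q : Int) (hp : 0 ≤ p) (hq : 0 ≤ q) (u : Int) (hu0 : 0 ≤ u) :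
    PySem.Int.bxor (PySem.Int.bxor u p) q = 0 ↔ u = PySem.Int.bxor p q := by
  rw [bxor_toNat u p hu0 hp, bxor_toNat p q hp hq]
  rw [bxor_toNat _ _ (by positivity) hq]
  simp only [Int.toNat_natCast]
  constructor
  · intro h
    have h0 : (u.toNat ^^^ p.toNat) ^^^ q.toNat = 0 := by exact_mod_cast h
    have := (natXorKey p.toNat u.toNat q.toNat).mp (by rwa [Nat.xor_comm p.toNat u.toNat])
    omega
  · intro h
    have : u.toNat = p.toNat ^^^ q.toNat := by omega
    have h0 := (natXorKey p.toNat u.toNat q.toNat).mpr this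
    rw [Nat.xor_comm u.toNat p.toNat, h0]; simp

theorem bxor_eq_zero (a b : Int) (ha : 0 ≤ a) (hb : 0 ≤ b) :
    PySem.Int.bxor a b = 0 ↔ a = b := by
  rw [bxor_toNat a b ha hb]
  rw [show ((0:Int) = ((0:Nat):Int)) from rfl]
  rw [Int.natCast_inj, Nat.xor_eq_zero_iff]
  omega

theorem bxor_nonneg (p q : Int) (hp : 0 ≤ p) (hq : 0 ≤ q) : 0 ≤ PySem.Int.bxor p q := by
  rw [bxor_toNat p q hp hq]; positivity

theorem exists_sub_eq (m X : Int) (hX : 0 ≤ X) :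
    (∃ i, (1 ≤ i ∧ i < m + 1) ∧ m - i = X) ↔ X < m := by
  constructor
  · rintro ⟨i, ⟨h1, h2⟩, h3⟩; omega
  · intro h; exact ⟨m - X, by omega, by omega⟩

theorem solve_eq_alt (n : Int) : solve n = solve_alt n := by
  by_cases hn : n < 1
  · have e1 : PySem.List.pyRange 1 (n + 1) 1 = [] := by
      simp [PySem.List.pyRange_one]; omega
    have e2 : PySem.List.pyRange 1 (2 * n + 1) 1 = [] := by
      simp [PySem.List.pyRange_one]; omega
    have e3 : PySem.List.pyRange 1 (3 * n + 1) 1 = [] := by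
      simp [PySem.List.pyRange_one]; omega
    simp [solve, solve_alt, e1, e2, e3, solveLoop1, solveLoop2, solveLoop3, hn]
  · have h1 : (0:Int) ≤ n := by omega
    have h2 : (0:Int) ≤ 2 * n := by omega
    have h3 : (0:Int) ≤ 3 * n := by omega
    have L1 : solveLoop1 n (PySem.List.pyRange 1 (n + 1) 1) = true ↔
        PySem.Int.bxor (2 * n) (3 * n) < n := by
      rw [solveLoop1_true]
      constructor
      · rintro ⟨i, hi, h⟩
        rw [PySem.List.mem_pyRange_one] at hi
        rw [searchKey _ _ h2 h3 _ (by omega)] at h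
        omega
      · intro h
        have hX := bxor_nonneg _ _ h2 h3
        obtain ⟨i, hi, he⟩ := (exists_sub_eq n (PySem.Int.bxor (2 * n) (3 * n)) hX).mpr h
        exact ⟨i, PySem.List.mem_pyRange_one.mpr hi,
          (searchKey _ _ h2 h3 _ (by omega)).mpr he⟩
    have L2 : solveLoop2 n (PySem.List.pyRange 1 (2 * n + 1) 1) = true ↔
        PySem.Int.bxor n (3 * n) < 2 * n := by
      rw [solveLoop2_true]
      constructor
      · rintro ⟨j, hj, h⟩
        rw [PySem.List.mem_pyRange_one] at hj
        rw [PySem.Int.bxor_comm n (2 * n - j)] at h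
        rw [searchKey _ _ h1 h3 _ (by omega)] at h
        omega
      · intro h
        have hX := bxor_nonneg _ _ h1 h3
        obtain ⟨j, hj, he⟩ :=
          (exists_sub_eq (2 * n) (PySem.Int.bxor n (3 * n)) hX).mpr h
        refine ⟨j, PySem.List.mem_pyRange_one.mpr hj, ?_⟩
        rw [PySem.Int.bxor_comm n (2 * n - j)]
        exact (searchKey _ _ h1 h3 _ (by omega)).mpr he
    have L3 : solveLoop3 n (PySem.List.pyRange 1 (3 * n + 1) 1) = true ↔
        PySem.Int.bxor n (2 * n) < 3 * n := by
      rw [solveLoop3_true]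
      have hZ := bxor_nonneg _ _ h1 h2
      constructor
      · rintro ⟨k, hk, h⟩
        rw [PySem.List.mem_pyRange_one] at hk
        rw [bxor_eq_zero _ _ hZ (by omega)] at h
        omega
      · intro h
        obtain ⟨k, hk, he⟩ :=
          (exists_sub_eq (3 * n) (PySem.Int.bxor n (2 * n)) hZ).mpr h
        refine ⟨k, PySem.List.mem_pyRange_one.mpr hk, ?_⟩
        rw [bxor_eq_zero _ _ hZ (by omega)]
        omega
    simp only [solve, solve_alt, hn, if_false]
    by_cases c1 : solveLoop1 n (PySem.List.pyRange 1 (n + 1) 1) <;>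
      by_cases c2 : solveLoop2 n (PySem.List.pyRange 1 (2 * n + 1) 1) <;>
        by_cases c3 : solveLoop3 n (PySem.List.pyRange 1 (3 * n + 1) 1) <;>
          simp_all [L1, L2, L3]

-- ===== VERDICT (by name: the statement is the Claim_ definition above) =====
theorem solve_spec : Claim_equal_solve := by
  intro n _
  unfold Spec_solve
  exact solve_eq_alt n
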